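-- pv_equiv track=rewrite | github.com/jrayon-sesamehr/voku-spec | tools/translator/grammar.py | parse_pronoun
-- ===== SOURCE A (Python) =====
-- FUNCTIONAL_STATES = {
--     "urgi": "urgency",
--     "sati": "satisfaction",
--     "nomi": "surprise",
--     "koli": "conflict",
--     "redi": "prepared",
--     "limi": "limited",
--     "vali": "aligned",
-- }
--
-- def parse_pronoun(word: str) -> dict:
--     """Parse a pronoun, including functional state suffixes.
--
--     E.g., 'sol-urgi' -> {'pronoun': 'sol', 'state': 'urgi'}
--     """
--     result = {"pronoun": word, "state": None}
--     for state_suffix, meaning in FUNCTIONAL_STATES.items():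
--         if word.endswith("-" + state_suffix):
--             base = word[:-(len(state_suffix) + 1)]
--             result["pronoun"] = base
--             result["state"] = state_suffix
--             break
--     return result
-- ===== SOURCE B (Python) =====
-- FUNCTIONAL_STATES = {
--     "urgi": "urgency",
--     "sati": "satisfaction",
--     "nomi": "surprise",
--     "koli": "conflict",
--     "redi": "prepared",
--     "limi": "limited",
--     "vali": "aligned",
-- }
--
-- def parse_pronoun(word: str) -> dict:
--     """Parse a pronoun, including functional state suffixes.
--
--     Split once at the last dash and look the suffix up in the table.
--     """
--     base, sep, suffix = word.rpartition("-")
--     if sep and suffix in FUNCTIONAL_STATES: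
--         return {"pronoun": base, "state": suffix}
--     return {"pronoun": word, "state": None}
-- ===== Notes on version B (the rewrite author's own statement) =====
-- stated objective: simpler
-- what changed: Replaces the loop over all seven suffixes (each tested with endswith plus a negative slice) by one rpartition at the last dash and a single dict-membership lookup.
import Mathlib
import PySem

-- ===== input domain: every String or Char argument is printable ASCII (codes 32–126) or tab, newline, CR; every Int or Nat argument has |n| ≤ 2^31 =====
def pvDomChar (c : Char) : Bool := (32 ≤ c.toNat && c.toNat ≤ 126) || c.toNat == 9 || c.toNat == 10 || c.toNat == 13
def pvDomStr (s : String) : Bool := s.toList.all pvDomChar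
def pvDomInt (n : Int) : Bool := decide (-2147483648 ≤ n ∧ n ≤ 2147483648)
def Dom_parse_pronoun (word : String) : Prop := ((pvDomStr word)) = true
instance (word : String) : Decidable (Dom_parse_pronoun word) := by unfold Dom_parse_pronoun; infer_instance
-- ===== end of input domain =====

-- B replaces A's seven endswith tests by one split at the last dash plus a table lookup (simpler).

-- ===== PORT A =====
-- FUNCTIONAL_STATES as an insertion-ordered association list (key, meaning)
def pvFunctionalStates : List (String × String) :=
  [("urgi", "urgency"), ("sati", "satisfaction"), ("nomi", "surprise"),
   ("koli", "conflict"), ("redi", "prepared"), ("limi", "limited"), ("vali", "aligned")]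

-- the for-loop with break: first matching suffix mutates result, then stop
def pvLoopA (word : String) (d : PySem.Dict String (Option String)) :
    List (String × String) → PySem.Dict String (Option String)
  | [] => d
  | (sfx, _) :: rest =>
    if PySem.Str.endswith word ("-" ++ sfx) then
      let base := PySem.Str.slice word none (some (-((PySem.Str.len sfx : Int) + 1)))
      (d.insert "pronoun" (some base)).insert "state" (some sfx)
    else pvLoopA word d rest

def parse_pronoun (word : String) : List (String × Option String) :=
  (pvLoopA word
    ((PySem.Dict.empty.insert "pronoun" (some word)).insert "state" none)
    pvFunctionalStates).items

-- ===== PORT B =====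
-- hand port of str.rpartition for the 1-char dash separator (PySem has no rpartition):
-- returns some (before, after) split at the LAST dash, none when there is no dash
def pvRPartDash : List Char → Option (List Char × List Char)
  | [] => none
  | c :: rest =>
    match pvRPartDash rest with
    | some (b, s) => some (c :: b, s)
    | none => if c = '-' then some ([], rest) else none

def parse_pronoun_alt (word : String) : List (String × Option String) :=
  match pvRPartDash word.toList with
  | some (b, s) =>
    if s ∈ ["urgi".toList, "sati".toList, "nomi".toList, "koli".toList,
            "redi".toList, "limi".toList, "vali".toList] then
      [("pronoun", some (String.ofList b)), ("state", some (String.ofList s))]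
    else
      [("pronoun", some word), ("state", none)]
  | none => [("pronoun", some word), ("state", none)]

-- ===== PRECONDITION & SPEC =====
def Spec_parse_pronoun (word : String) (out : List (String × Option String)) : Prop := out = parse_pronoun_alt word
instance (word : String) (out : List (String × Option String)) : Decidable (Spec_parse_pronoun word out) := by unfold Spec_parse_pronoun; infer_instance

-- ===== CLAIM (what is proved, stated in full; the proofs are below) =====
def Claim_equal_parse_pronoun : Prop := ∀ (word : String), Dom_parse_pronoun word → Spec_parse_pronoun word (parse_pronoun word)

-- ===== LEMMAS AND PROOFS =====

-- characterisation of the rpartition helper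
theorem pvRPartDash_none {l : List Char} (h : pvRPartDash l = none) : '-' ∉ l := by
  induction l with
  | nil => simp
  | cons c rest ih =>
    simp only [pvRPartDash] at h
    cases hr : pvRPartDash rest with
    | some p => rw [hr] at h; cases p; simp at h
    | none =>
      rw [hr] at h
      split_ifs at h with hc
      intro hm
      rcases List.mem_cons.mp hm with h1 | h2
      · exact hc h1.symm
      · exact ih hr h2

theorem pvRPartDash_some {l b s : List Char} (h : pvRPartDash l = some (b, s)) :
    l = b ++ '-' :: s ∧ '-' ∉ s := by
  induction l generalizing b with
  | nil => simp [pvRPartDash] at h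
  | cons c rest ih =>
    simp only [pvRPartDash] at h
    cases hr : pvRPartDash rest with
    | some p =>
      rcases p with ⟨b', s'⟩
      rw [hr] at h
      simp only [Option.some.injEq, Prod.mk.injEq] at h
      obtain ⟨hb, hs⟩ := h
      obtain ⟨h1, h2⟩ := ih (hs ▸ hr)
      subst hb
      exact ⟨by rw [List.cons_append, ← h1], h2⟩
    | none =>
      rw [hr] at h
      split_ifs at h with hc
      simp only [Option.some.injEq, Prod.mk.injEq] at h
      obtain ⟨hb, hs⟩ := h
      subst hb; subst hs; subst hc
      exact ⟨rfl, pvRPartDash_none hr⟩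

-- two dash-free tails after a dash in the same list coincide
theorem pv_tail_unique {s t : List Char} {l : List Char}
    (hs : ('-' :: s) <:+ l) (ht : ('-' :: t) <:+ l)
    (hns : '-' ∉ s) (hnt : '-' ∉ t) : s = t := by
  rcases Nat.lt_trichotomy s.length t.length with hlt | heq | hgt
  · exfalso
    have h1 : ('-' :: s) <:+ ('-' :: t) :=
      List.suffix_of_suffix_length_le hs ht (by simp; omega)
    have h2 : ('-' :: s) <:+ t := by
      rcases (List.suffix_cons_iff).mp h1 with h2 | h2
      · exact absurd (congrArg List.length h2) (by simp; omega)
      · exact h2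
    exact hnt (h2.subset (by simp))
  · have h1 : ('-' :: s) <:+ ('-' :: t) :=
      List.suffix_of_suffix_length_le hs ht (by simp; omega)
    have h2 := (List.IsSuffix.sublist h1).eq_of_length (by simp [heq])
    simpa using h2
  · exfalso
    have h1 : ('-' :: t) <:+ ('-' :: s) :=
      List.suffix_of_suffix_length_le ht hs (by simp; omega)
    have h2 : ('-' :: t) <:+ s := by
      rcases (List.suffix_cons_iff).mp h1 with h2 | h2
      · exact absurd (congrArg List.length h2) (by simp; omega)
      · exact h2
    exact hns (h2.subset (by simp))

-- A's endswith test, expressed through B's split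
theorem pv_endswith_eq {word : String} {b s : List Char}
    (h : pvRPartDash word.toList = some (b, s)) (sfx : String) (hsfx : '-' ∉ sfx.toList) :
    PySem.Str.endswith word ("-" ++ sfx) = decide (s = sfx.toList) := by
  obtain ⟨hl, hns⟩ := pvRPartDash_some h
  have htl : ("-" ++ sfx).toList = '-' :: sfx.toList := by
    simp [String.toList_append]
  rw [PySem.Str.endswith_eq, htl]
  by_cases he : s = sfx.toList
  · rw [decide_eq_true he]
    exact (PySem.Chars.endswith_iff _ _).mpr ⟨b, by rw [hl, he]⟩
  · rw [decide_eq_false he, ← Bool.not_eq_true]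
    intro hc
    have hsuf := (PySem.Chars.endswith_iff _ _).mp hc
    have hs2 : ('-' :: s) <:+ word.toList := ⟨b, by rw [hl]⟩
    exact he (pv_tail_unique hs2 hsuf hns hsfx)

-- A's slice word[:-(4+1)] is the part before the last dash (when the tail has length 4)
theorem pv_slice_eq {word : String} {b s : List Char}
    (h : pvRPartDash word.toList = some (b, s)) (hlen : s.length = 4) :
    PySem.Str.slice word none (some (-5 : Int)) = String.ofList b := by
  obtain ⟨hl, _⟩ := pvRPartDash_some h
  rw [← String.toList_inj, PySem.Str.toList_slice, PySem.Chars.slice_eq_listSlice]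
  have h5 : ((-5 : Int)) = -((5 : Nat) : Int) := by norm_num
  rw [h5, PySem.List.slice_to_neg_natCast _ _ (by norm_num)]
  have hlw : word.toList.length = b.length + 5 := by
    rw [hl]; simp [hlen]
  rw [hlw, hl]
  simp

-- ===== VERDICT (by name: the statement is the Claim_ definition above) =====
theorem parse_pronoun_spec : Claim_equal_parse_pronoun := by
  intro word _
  unfold Spec_parse_pronoun parse_pronoun parse_pronoun_alt
  cases hr : pvRPartDash word.toList with
  | none =>
    have hnone : ∀ l : List Char, PySem.Chars.endswith word.toList ('-' :: l) = false := by
      intro l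
      rw [← Bool.not_eq_true]
      intro hc
      have hsuf := (PySem.Chars.endswith_iff _ _).mp hc
      exact pvRPartDash_none hr (hsuf.subset (by simp))
    simp [pvFunctionalStates, pvLoopA, hnone, PySem.Dict.insert, PySem.Dict.empty]
  | some p =>
    rcases p with ⟨b, s⟩
    have hew := fun (sfx : String) (hsfx : '-' ∉ sfx.toList) => pv_endswith_eq hr sfx hsfx
    have e1 : PySem.Chars.endswith word.toList ['-', 'u', 'r', 'g', 'i'] = decide (s = ['u', 'r', 'g', 'i']) := by
      simpa using hew "urgi" (by decide)
    have e2 : PySem.Chars.endswith word.toList ['-', 's', 'a', 't', 'i'] = decide (s = ['s', 'a', 't', 'i']) := by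
      simpa using hew "sati" (by decide)
    have e3 : PySem.Chars.endswith word.toList ['-', 'n', 'o', 'm', 'i'] = decide (s = ['n', 'o', 'm', 'i']) := by
      simpa using hew "nomi" (by decide)
    have e4 : PySem.Chars.endswith word.toList ['-', 'k', 'o', 'l', 'i'] = decide (s = ['k', 'o', 'l', 'i']) := by
      simpa using hew "koli" (by decide)
    have e5 : PySem.Chars.endswith word.toList ['-', 'r', 'e', 'd', 'i'] = decide (s = ['r', 'e', 'd', 'i']) := by
      simpa using hew "redi" (by decide)
    have e6 : PySem.Chars.endswith word.toList ['-', 'l', 'i', 'm', 'i'] = decide (s = ['l', 'i', 'm', 'i']) := by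
      simpa using hew "limi" (by decide)
    have e7 : PySem.Chars.endswith word.toList ['-', 'v', 'a', 'l', 'i'] = decide (s = ['v', 'a', 'l', 'i']) := by
      simpa using hew "vali" (by decide)
    have hsl := fun (h4 : s.length = 4) => pv_slice_eq hr h4
    by_cases h1 : s = ['u', 'r', 'g', 'i']
    · subst h1
      simp_all [pvFunctionalStates, pvLoopA, PySem.Dict.insert, PySem.Dict.empty, hsl rfl]
    · by_cases h2 : s = ['s', 'a', 't', 'i']
      · subst h2
        simp_all [pvFunctionalStates, pvLoopA, PySem.Dict.insert, PySem.Dict.empty, hsl rfl]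
      · by_cases h3 : s = ['n', 'o', 'm', 'i']
        · subst h3
          simp_all [pvFunctionalStates, pvLoopA, PySem.Dict.insert, PySem.Dict.empty, hsl rfl]
        · by_cases h4 : s = ['k', 'o', 'l', 'i']
          · subst h4
            simp_all [pvFunctionalStates, pvLoopA, PySem.Dict.insert, PySem.Dict.empty, hsl rfl]
          · by_cases h5 : s = ['r', 'e', 'd', 'i']
            · subst h5
              simp_all [pvFunctionalStates, pvLoopA, PySem.Dict.insert, PySem.Dict.empty, hsl rfl]
            · by_cases h6 : s = ['l', 'i', 'm', 'i']
              · subst h6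
                simp_all [pvFunctionalStates, pvLoopA, PySem.Dict.insert, PySem.Dict.empty, hsl rfl]
              · by_cases h7 : s = ['v', 'a', 'l', 'i']
                · subst h7
                  simp_all [pvFunctionalStates, pvLoopA, PySem.Dict.insert, PySem.Dict.empty, hsl rfl]
                · simp [pvFunctionalStates, pvLoopA, h1, h2, h3, h4, h5, h6, h7,
                    e1, e2, e3, e4, e5, e6, e7, PySem.Dict.insert, PySem.Dict.empty]
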